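-- pv_equiv track=rewrite | github.com/zsofiam/embroidery-python | embroidery.py | draw_christmas_tree
-- ===== SOURCE A (Python) =====
-- def draw_base_matrix(width, height, color):
--     matrix = [[color for column in range(width)] for row in range(height)]
--     return matrix
--
-- def draw_christmas_tree(blocks, border_color=1, fill_color=1):
--     if blocks < 1 or border_color not in [0,1,2] or fill_color not in [0,1,2]:
--         raise ValueError("Error: Incorrect parameter given! Cannot draw Christmas tree!")
--     height = blocks * 3
--     width = blocks * 2 + 3
--     matrix = draw_base_matrix(width, height, 0)
--     start_place = blocks + 2
--     count = 3
--     for row in range(height):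
--         if row % 3 == 0:
--             start_place -= 1
--             count -= 2
--         else:
--             count += 2
--         modify_start_place = row % 3
--         for i in range(count):
--             if i == 0 or i == count - 1:
--                 matrix[row][start_place - modify_start_place + i] = border_color
--             else:
--                 matrix[row][start_place - modify_start_place + i] = fill_color
--         if row == height - 1:
--             for i in range(width):
--                 matrix[row][i] = border_color
--     return matrix
-- ===== SOURCE B (Python) =====
-- def draw_christmas_tree(blocks, border_color=1, fill_color=1):
--     if blocks < 1 or border_color not in [0,1,2] or fill_color not in [0,1,2]:
--         raise ValueError("Error: Incorrect parameter given! Cannot draw Christmas tree!")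
--     height = blocks * 3
--     width = blocks * 2 + 3
--     rows = []
--     for row in range(height):
--         if row == height - 1:
--             rows.append([border_color] * width)
--         else:
--             b, r = divmod(row, 3)
--             count = 2 * b + 2 * r + 1
--             left = blocks + 1 - b - r
--             if count == 1:
--                 middle = [border_color]
--             else:
--                 middle = [border_color] + [fill_color] * (count - 2) + [border_color]
--             rows.append([0] * left + middle + [0] * (width - left - count))
--     return rows
-- ===== Notes on version B (the rewrite author's own statement) =====
-- stated objective: alternative
-- what changed: B replaces A's mutation of a pre-built zero matrix with state (start_place, count) carried across rows by a per-row closed form (b=row//3, r=row%3 give count=2b+2r+1 and left offset blocks+1-b-r) that builds each row independently by list concatenation, no base matrix and no in-place assignment.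
import Mathlib
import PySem

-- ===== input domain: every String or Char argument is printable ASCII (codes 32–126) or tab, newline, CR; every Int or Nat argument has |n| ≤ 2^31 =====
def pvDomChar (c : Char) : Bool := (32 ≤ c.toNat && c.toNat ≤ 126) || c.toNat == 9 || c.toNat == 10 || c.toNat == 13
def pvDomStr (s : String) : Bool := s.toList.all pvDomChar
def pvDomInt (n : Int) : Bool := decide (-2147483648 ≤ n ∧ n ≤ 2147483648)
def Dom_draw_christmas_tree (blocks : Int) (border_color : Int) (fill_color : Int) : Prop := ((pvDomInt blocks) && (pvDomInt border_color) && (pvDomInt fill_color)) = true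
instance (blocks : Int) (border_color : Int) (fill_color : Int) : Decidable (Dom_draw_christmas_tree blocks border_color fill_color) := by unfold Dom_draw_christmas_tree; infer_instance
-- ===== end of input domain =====

-- B builds each row independently from a closed form instead of mutating a base matrix with loop-carried state; equivalence of return values is proved (A mutates only its own fresh matrix, so there is no observable side effect).

-- ===== PORT A =====
-- matrix[row][col] = v ; exact for 0 ≤ row < len(matrix) and 0 ≤ col < len(matrix[row]), which holds at every assignment A performs on admitted inputs
def pvSetCell (m : List (List Int)) (row : Int) (col : Int) (v : Int) : List (List Int) :=
  m.modify row.toNat (fun r => r.set col.toNat v)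

def draw_base_matrix (width : Int) (height : Int) (color : Int) : List (List Int) :=
  (PySem.List.pyRange 0 height 1).map (fun _row => (PySem.List.pyRange 0 width 1).map (fun _column => color))

-- the body of A's `for row in range(height)` loop, acting on the state (matrix, start_place, count)
def pvStepA (border_color : Int) (fill_color : Int) (height : Int) (width : Int)
    (st : List (List Int) × Int × Int) (row : Int) : List (List Int) × Int × Int :=
  let start_place := if PySem.Int.mod row 3 = 0 then st.2.1 - 1 else st.2.1
  let count := if PySem.Int.mod row 3 = 0 then st.2.2 - 2 else st.2.2 + 2
  let modify_start_place := PySem.Int.mod row 3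
  let m := (PySem.List.pyRange 0 count 1).foldl
    (fun m i => pvSetCell m row (start_place - modify_start_place + i)
      (if i = 0 ∨ i = count - 1 then border_color else fill_color)) st.1
  let m := if row = height - 1 then
      (PySem.List.pyRange 0 width 1).foldl (fun m i => pvSetCell m row i border_color) m
    else m
  (m, start_place, count)

def draw_christmas_tree (blocks : Int) (border_color : Int) (fill_color : Int) : List (List Int) :=
  if blocks < 1 ∨ border_color ∉ ([0, 1, 2] : List Int) ∨ fill_color ∉ ([0, 1, 2] : List Int) then
    []  -- Python raises ValueError here; Pre_ excludes these inputs
  else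
    let height := blocks * 3
    let width := blocks * 2 + 3
    let matrix := draw_base_matrix width height 0
    ((PySem.List.pyRange 0 height 1).foldl
      (pvStepA border_color fill_color height width) (matrix, blocks + 2, 3)).1

-- ===== PORT B =====
def pvRowB (blocks : Int) (border_color : Int) (fill_color : Int) (height : Int) (width : Int)
    (row : Int) : List Int :=
  if row = height - 1 then
    List.replicate width.toNat border_color
  else
    let b := PySem.Int.floordiv row 3
    let r := PySem.Int.mod row 3
    let count := 2 * b + 2 * r + 1
    let left := blocks + 1 - b - r
    let middle := if count = 1 then [border_color]
      else [border_color] ++ List.replicate (count - 2).toNat fill_color ++ [border_color]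
    List.replicate left.toNat 0 ++ middle ++ List.replicate (width - left - count).toNat 0

def draw_christmas_tree_alt (blocks : Int) (border_color : Int) (fill_color : Int) : List (List Int) :=
  if blocks < 1 ∨ border_color ∉ ([0, 1, 2] : List Int) ∨ fill_color ∉ ([0, 1, 2] : List Int) then
    []  -- Python raises ValueError here; Pre_ excludes these inputs
  else
    let height := blocks * 3
    let width := blocks * 2 + 3
    (PySem.List.pyRange 0 height 1).map (pvRowB blocks border_color fill_color height width)

-- ===== PRECONDITION & SPEC =====
-- Pre_ excludes exactly the inputs on which A raises ValueError (blocks < 1 or a color outside {0,1,2}).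
def Pre_draw_christmas_tree (blocks : Int) (border_color : Int) (fill_color : Int) : Prop :=
  1 ≤ blocks ∧ border_color ∈ ([0, 1, 2] : List Int) ∧ fill_color ∈ ([0, 1, 2] : List Int)

instance (blocks : Int) (border_color : Int) (fill_color : Int) : Decidable (Pre_draw_christmas_tree blocks border_color fill_color) := by unfold Pre_draw_christmas_tree; infer_instance

def pvWitness_draw_christmas_tree : Int × Int × Int := (2, 1, 2)

def Spec_draw_christmas_tree (blocks : Int) (border_color : Int) (fill_color : Int) (out : List (List Int)) : Prop := out = draw_christmas_tree_alt blocks border_color fill_color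
instance (blocks : Int) (border_color : Int) (fill_color : Int) (out : List (List Int)) : Decidable (Spec_draw_christmas_tree blocks border_color fill_color out) := by unfold Spec_draw_christmas_tree; infer_instance

-- ===== CLAIM (what is proved, stated in full; the proofs are below) =====
def Claim_equal_draw_christmas_tree : Prop := ∀ (blocks : Int) (border_color : Int) (fill_color : Int), Dom_draw_christmas_tree blocks border_color fill_color → Pre_draw_christmas_tree blocks border_color fill_color → Spec_draw_christmas_tree blocks border_color fill_color (draw_christmas_tree blocks border_color fill_color)

-- ===== LEMMAS AND PROOFS =====

-- modify twice at the same index composes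
theorem pv_modify_modify {α : Type} (l : List α) (n : Nat) (f g : α → α) :
    (l.modify n f).modify n g = l.modify n (fun x => g (f x)) := by
  apply List.ext_getElem?
  intro j
  simp only [List.getElem?_modify]
  cases l[j]? <;> simp <;> split_ifs <;> simp

theorem pv_modify_id {α : Type} (l : List α) (n : Nat) :
    l.modify n (fun x => x) = l := by
  apply List.ext_getElem?
  intro j
  simp only [List.getElem?_modify]
  cases l[j]? <;> simp

theorem pv_modify_zero {α : Type} (a : α) (t : List α) (f : α → α) :
    (a :: t).modify 0 f = f a :: t := rfl

theorem pv_modify_append {α : Type} (l1 l2 : List α) (f : α → α) (n : Nat)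
    (h : n = l1.length) : (l1 ++ l2).modify n f = l1 ++ l2.modify 0 f := by
  subst h
  apply List.ext_getElem?
  intro j
  simp only [List.getElem?_modify, List.getElem?_append]
  by_cases hj : j < l1.length
  · have : l1.length ≠ j := by omega
    simp [hj, this]
  · by_cases he : l1.length = j
    · have : j - l1.length = 0 := by omega
      simp [hj, he, this]
    · have : 0 ≠ j - l1.length := by omega
      simp [hj, he, this]

-- pull the row-modification out of the inner paint loop
theorem pv_extract_inner (l : List Int) (m : List (List Int)) (row s climit bcol fcol : Int) :
    l.foldl (fun m i => pvSetCell m row (s + i) (if i = 0 ∨ i = climit then bcol else fcol)) m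
      = m.modify row.toNat
          (fun rr => l.foldl (fun rr i => rr.set (s + i).toNat (if i = 0 ∨ i = climit then bcol else fcol)) rr) := by
  induction l generalizing m with
  | nil => simp [pv_modify_id]
  | cons a t ih =>
    simp only [List.foldl_cons]
    rw [ih, pvSetCell, pv_modify_modify]

-- pull the row-modification out of the final-row override loop
theorem pv_extract_const (l : List Int) (m : List (List Int)) (row bcol : Int) :
    l.foldl (fun m i => pvSetCell m row i bcol) m
      = m.modify row.toNat (fun rr => l.foldl (fun rr i => rr.set i.toNat bcol) rr) := by
  induction l generalizing m with
  | nil => simp [pv_modify_id]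
  | cons a t ih =>
    simp only [List.foldl_cons]
    rw [ih, pvSetCell, pv_modify_modify]

-- characterization of painting a run of cells at offsets s, s+1, …, s+n-1
theorem pv_length_paint (v : Nat → Int) (s : Int) (n : Nat) (r0 : List Int) :
    ((List.range n).foldl (fun r i => r.set (s + (i : Int)).toNat (v i)) r0).length = r0.length := by
  induction n with
  | zero => simp
  | succ n ih => simp [List.range_succ, ih]

theorem pv_getElem?_paint (v : Nat → Int) (s : Int) (hs : 0 ≤ s) (n : Nat) (r0 : List Int) (j : Nat) :
    ((List.range n).foldl (fun r i => r.set (s + (i : Int)).toNat (v i)) r0)[j]?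
      = if s.toNat ≤ j ∧ j < s.toNat + n ∧ j < r0.length then some (v (j - s.toNat)) else r0[j]? := by
  induction n with
  | zero =>
    simp only [List.range_zero, List.foldl_nil]
    rw [if_neg (by omega)]
  | succ n ih =>
    rw [List.range_succ, List.foldl_append]
    simp only [List.foldl_cons, List.foldl_nil]
    rw [List.getElem?_set, pv_length_paint, ih]
    by_cases hj : (s + (n : Int)).toNat = j
    · rw [if_pos hj]
      by_cases hl : (s + (n : Int)).toNat < r0.length
      · rw [if_pos hl, if_pos (by omega)]
        have : j - s.toNat = n := by omega
        rw [this]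
      · rw [if_neg hl, if_neg (by omega), List.getElem?_eq_none (by omega)]
    · rw [if_neg hj]
      by_cases hin : s.toNat ≤ j ∧ j < s.toNat + n ∧ j < r0.length
      · rw [if_pos hin, if_pos (by omega)]
      · rw [if_neg hin, if_neg (by omega)]

-- painting all of a row with a constant
theorem pv_length_paintc (c : Int) (n : Nat) (r0 : List Int) :
    ((List.range n).foldl (fun r k => r.set k c) r0).length = r0.length := by
  induction n with
  | zero => simp
  | succ n ih => simp [List.range_succ, ih]

theorem pv_getElem?_paintc (c : Int) (n : Nat) (r0 : List Int) (j : Nat) :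
    ((List.range n).foldl (fun r k => r.set k c) r0)[j]?
      = if j < n ∧ j < r0.length then some c else r0[j]? := by
  induction n with
  | zero => simp
  | succ n ih =>
    rw [List.range_succ, List.foldl_append]
    simp only [List.foldl_cons, List.foldl_nil]
    rw [List.getElem?_set, pv_length_paintc, ih]
    by_cases hj : n = j
    · subst hj
      rw [if_pos rfl]
      by_cases hl : n < r0.length
      · rw [if_pos hl, if_pos (by omega)]
      · rw [if_neg hl, if_neg (by omega), List.getElem?_eq_none (by omega)]
    · rw [if_neg hj]
      by_cases hin : j < n ∧ j < r0.length
      · rw [if_pos hin, if_pos (by omega)]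
      · rw [if_neg hin, if_neg (by omega)]

theorem pv_paintc_full (c : Int) (n : Nat) (r0 : List Int) (h : r0.length = n) :
    (List.range n).foldl (fun r k => r.set k c) r0 = List.replicate n c := by
  apply List.ext_getElem?
  intro j
  rw [pv_getElem?_paintc, List.getElem?_replicate]
  by_cases hj : j < n
  · rw [if_pos (by omega), if_pos hj]
  · rw [if_neg (by omega), if_neg hj, List.getElem?_eq_none (by omega)]

-- indexing into B's middle segment
theorem pv_middle_get (border fill c : Int) (hc : 1 ≤ c) (i : Nat) (hi : i < c.toNat) :
    ((if c = 1 then [border]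
      else [border] ++ List.replicate (c - 2).toNat fill ++ [border]) : List Int)[i]?
      = some (if (i : Int) = 0 ∨ (i : Int) = c - 1 then border else fill) := by
  by_cases h1 : c = 1
  · have hi0 : i = 0 := by omega
    subst hi0
    simp [h1]
  · rw [if_neg h1]
    rcases i with _ | i
    · simp
    · simp only [List.cons_append, List.nil_append, List.getElem?_cons_succ]
      by_cases h2 : i < (c - 2).toNat
      · rw [List.getElem?_append, if_pos (by simp; omega), List.getElem?_replicate, if_pos h2,
          if_neg (by push_cast; omega)]
      · have hie : i - (List.replicate (c - 2).toNat fill).length = 0 := by simp; omega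
        rw [List.getElem?_append, if_neg (by simp; omega), hie,
          if_pos (Or.inr (by push_cast; omega))]
        rfl

-- the painted zero row equals B's constructed row
theorem pv_painted_row (border fill : Int) (s c W : Int) (hs : 0 ≤ s) (hc : 1 ≤ c) (hW : s + c ≤ W) :
    (List.range c.toNat).foldl
        (fun r i => r.set (s + (i : Int)).toNat
          (if (i : Int) = 0 ∨ (i : Int) = c - 1 then border else fill))
        (List.replicate W.toNat (0 : Int))
      = List.replicate s.toNat 0
          ++ (if c = 1 then [border]
              else [border] ++ List.replicate (c - 2).toNat fill ++ [border])
          ++ List.replicate (W - s - c).toNat 0 := by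
  apply List.ext_getElem?
  intro j
  rw [pv_getElem?_paint _ s hs]
  simp only [List.length_replicate]
  have hmidlen : (if c = 1 then [border]
      else [border] ++ List.replicate (c - 2).toNat fill ++ [border]).length = c.toNat := by
    by_cases h1 : c = 1
    · simp [h1]
    · rw [if_neg h1]; simp; omega
  by_cases hin : s.toNat ≤ j ∧ j < s.toNat + c.toNat ∧ j < W.toNat
  · rw [if_pos hin]
    have h0 : j < ((List.replicate s.toNat (0:Int)) ++ (if c = 1 then [border]
        else [border] ++ List.replicate (c - 2).toNat fill ++ [border])).length := by
      rw [List.length_append, List.length_replicate, hmidlen]; omega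
    rw [List.getElem?_append, if_pos h0]
    have h1 : ¬ j < (List.replicate s.toNat (0:Int)).length := by simp; omega
    rw [List.getElem?_append, if_neg h1]
    simp only [List.length_replicate]
    rw [pv_middle_get border fill c hc _ (by omega)]
  · rw [if_neg hin]
    by_cases hjW : j < W.toNat
    · rw [List.getElem?_replicate, if_pos hjW]
      by_cases hjs : j < s.toNat
      · have h0 : j < ((List.replicate s.toNat (0:Int)) ++ (if c = 1 then [border]
            else [border] ++ List.replicate (c - 2).toNat fill ++ [border])).length := by
          rw [List.length_append, List.length_replicate, hmidlen]; omega
        rw [List.getElem?_append, if_pos h0]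
        have h1 : j < (List.replicate s.toNat (0:Int)).length := by simpa using hjs
        rw [List.getElem?_append, if_pos h1, List.getElem?_replicate, if_pos hjs]
      · have h0 : ¬ j < ((List.replicate s.toNat (0:Int)) ++ (if c = 1 then [border]
            else [border] ++ List.replicate (c - 2).toNat fill ++ [border])).length := by
          rw [List.length_append, List.length_replicate, hmidlen]; omega
        rw [List.getElem?_append, if_neg h0]
        have hlen : ((List.replicate s.toNat (0:Int)) ++ (if c = 1 then [border]
            else [border] ++ List.replicate (c - 2).toNat fill ++ [border])).length
            = s.toNat + c.toNat := by rw [List.length_append, List.length_replicate, hmidlen]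
        rw [hlen, List.getElem?_replicate, if_pos (by omega)]
    · have h5 : (List.replicate W.toNat (0:Int)).length ≤ j := by simp; omega
      rw [List.getElem?_eq_none h5, List.getElem?_eq_none]
      rw [List.length_append, List.length_append, List.length_replicate, List.length_replicate,
        hmidlen]
      omega

-- A's base matrix is a replicate of zero rows
theorem pv_map_const {α β : Type} (l : List α) (b : β) :
    l.map (fun _ => b) = List.replicate l.length b := by
  induction l with
  | nil => rfl
  | cons a t ih => simp [ih, List.replicate_succ]

theorem pv_base_matrix (width height color : Int) :
    draw_base_matrix width height color
      = List.replicate height.toNat (List.replicate width.toNat color) := by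
  rw [draw_base_matrix, PySem.List.pyRange_one, PySem.List.pyRange_one, pv_map_const, pv_map_const]
  simp

-- the outer-loop invariant: after k rows, the first k rows are B's rows, the rest are
-- untouched zero rows, and (start_place, count) have the stated closed forms
theorem pv_outer_inv (blocks border fill : Int) (hb : 1 ≤ blocks) (k : Nat)
    (hk : (k : Int) ≤ blocks * 3) :
    (List.range k).foldl
        (fun st (j : Nat) => pvStepA border fill (blocks * 3) (blocks * 2 + 3) st (j : Int))
        (List.replicate (blocks * 3).toNat (List.replicate (blocks * 2 + 3).toNat (0 : Int)),
          blocks + 2, 3)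
      = ((List.range k).map
            (fun (j : Nat) => pvRowB blocks border fill (blocks * 3) (blocks * 2 + 3) (j : Int))
          ++ List.replicate ((blocks * 3).toNat - k) (List.replicate (blocks * 2 + 3).toNat (0 : Int)),
         blocks + 2 - (((k + 2) / 3 : Nat) : Int),
         3 + 2 * (k : Int) - 4 * (((k + 2) / 3 : Nat) : Int)) := by
  induction k with
  | zero => simp
  | succ k ih =>
    have hk' : (k : Int) ≤ blocks * 3 := by push_cast at hk ⊢; omega
    have hklt : (k : Int) < blocks * 3 := by push_cast at hk; omega
    rw [List.range_succ, List.foldl_append, ih hk', List.foldl_cons, List.foldl_nil]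
    have hmod : PySem.Int.mod ((k : Nat) : Int) 3 = ((k % 3 : Nat) : Int) := by
      exact_mod_cast PySem.Int.mod_natCast k 3
    have hfd : PySem.Int.floordiv ((k : Nat) : Int) 3 = ((k / 3 : Nat) : Int) := by
      exact_mod_cast PySem.Int.floordiv_natCast k 3
    unfold pvStepA
    simp only [hmod]
    -- closed forms for the updated start_place and count
    have hSP : (if ((k % 3 : Nat) : Int) = 0
          then blocks + 2 - (((k + 2) / 3 : Nat) : Int) - 1
          else blocks + 2 - (((k + 2) / 3 : Nat) : Int))
        = blocks + 1 - ((k / 3 : Nat) : Int) := by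
      split_ifs with h
      · have h' : k % 3 = 0 := by exact_mod_cast h
        push_cast
        omega
      · have h' : k % 3 ≠ 0 := fun hc => h (by exact_mod_cast hc)
        push_cast
        omega
    have hC : (if ((k % 3 : Nat) : Int) = 0
          then 3 + 2 * (k : Int) - 4 * (((k + 2) / 3 : Nat) : Int) - 2
          else 3 + 2 * (k : Int) - 4 * (((k + 2) / 3 : Nat) : Int) + 2)
        = 2 * ((k / 3 : Nat) : Int) + 2 * ((k % 3 : Nat) : Int) + 1 := by
      split_ifs with h
      · have h' : k % 3 = 0 := by exact_mod_cast h
        push_cast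
        omega
      · have h' : k % 3 ≠ 0 := fun hc => h (by exact_mod_cast hc)
        push_cast
        omega
    simp only [hSP, hC, Prod.mk.injEq]
    refine ⟨?_, by push_cast; omega, by push_cast; omega⟩
    -- the matrix component
    rw [pv_extract_inner]
    have hL0 : (0:Int) ≤ blocks + 1 - ((k / 3 : Nat) : Int) - ((k % 3 : Nat) : Int) := by
      push_cast; omega
    have hC1 : (1:Int) ≤ 2 * ((k / 3 : Nat) : Int) + 2 * ((k % 3 : Nat) : Int) + 1 := by
      push_cast; omega
    have hLW : (blocks + 1 - ((k / 3 : Nat) : Int) - ((k % 3 : Nat) : Int))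
        + (2 * ((k / 3 : Nat) : Int) + 2 * ((k % 3 : Nat) : Int) + 1) ≤ blocks * 2 + 3 := by
      push_cast; omega
    have hrep : (blocks * 3).toNat - k = ((blocks * 3).toNat - (k + 1)) + 1 := by omega
    have hrow : ((k : Nat) : Int).toNat = ((List.range k).map
        (fun (j : Nat) => pvRowB blocks border fill (blocks * 3) (blocks * 2 + 3) (j : Int))).length := by
      simp
    -- the row written by iteration k is B's row k
    have hpaint : ∀ r0 : List Int,
        (PySem.List.pyRange 0 (2 * ((k / 3 : Nat) : Int) + 2 * ((k % 3 : Nat) : Int) + 1) 1).foldl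
          (fun rr i => rr.set
            (blocks + 1 - ((k / 3 : Nat) : Int) - ((k % 3 : Nat) : Int) + i).toNat
            (if i = 0 ∨ i = 2 * ((k / 3 : Nat) : Int) + 2 * ((k % 3 : Nat) : Int) + 1 - 1
              then border else fill)) r0
        = (List.range (2 * ((k / 3 : Nat) : Int) + 2 * ((k % 3 : Nat) : Int) + 1).toNat).foldl
          (fun rr (i : Nat) => rr.set
            (blocks + 1 - ((k / 3 : Nat) : Int) - ((k % 3 : Nat) : Int) + (i : Int)).toNat
            (if (i : Int) = 0 ∨ (i : Int) = 2 * ((k / 3 : Nat) : Int) + 2 * ((k % 3 : Nat) : Int) + 1 - 1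
              then border else fill)) r0 := by
      intro r0
      rw [PySem.List.pyRange_one]
      simp only [Int.sub_zero, List.foldl_map, zero_add]
    by_cases hlast : ((k : Nat) : Int) = blocks * 3 - 1
    · rw [if_pos hlast, pv_extract_const, pv_modify_modify, hrep, List.replicate_succ,
        pv_modify_append _ _ _ _ hrow, pv_modify_zero]
      have hover : ∀ r0 : List Int, r0.length = (blocks * 2 + 3).toNat →
          (PySem.List.pyRange 0 (blocks * 2 + 3) 1).foldl (fun rr i => rr.set i.toNat border) r0
            = List.replicate (blocks * 2 + 3).toNat border := by
        intro r0 h0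
        rw [PySem.List.pyRange_one]
        simp only [Int.sub_zero, List.foldl_map, zero_add, Int.toNat_natCast]
        exact pv_paintc_full border _ r0 h0
      rw [hpaint, hover _ (by rw [pv_length_paint]; simp)]
      have hrowB : pvRowB blocks border fill (blocks * 3) (blocks * 2 + 3) ((k : Nat) : Int)
          = List.replicate (blocks * 2 + 3).toNat border := by
        rw [pvRowB, if_pos hlast]
      simp [List.map_append, hrowB]
    · rw [if_neg hlast, hrep, List.replicate_succ, pv_modify_append _ _ _ _ hrow, pv_modify_zero]
      rw [hpaint, pv_painted_row border fill _ _ _ hL0 hC1 hLW]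
      have hrowB : pvRowB blocks border fill (blocks * 3) (blocks * 2 + 3) ((k : Nat) : Int)
          = List.replicate (blocks + 1 - ((k / 3 : Nat) : Int) - ((k % 3 : Nat) : Int)).toNat 0
            ++ (if 2 * ((k / 3 : Nat) : Int) + 2 * ((k % 3 : Nat) : Int) + 1 = 1 then [border]
                else [border]
                  ++ List.replicate (2 * ((k / 3 : Nat) : Int) + 2 * ((k % 3 : Nat) : Int) + 1 - 2).toNat fill
                  ++ [border])
            ++ List.replicate (blocks * 2 + 3 - (blocks + 1 - ((k / 3 : Nat) : Int) - ((k % 3 : Nat) : Int))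
                - (2 * ((k / 3 : Nat) : Int) + 2 * ((k % 3 : Nat) : Int) + 1)).toNat 0 := by
        rw [pvRowB, if_neg hlast, hfd, hmod]
      rw [← hrowB]
      simp [List.map_append]

-- ===== VERDICT (by name: the statement is the Claim_ definition above) =====
theorem draw_christmas_tree_spec : Claim_equal_draw_christmas_tree := by
  intro blocks border fill _hdom hpre
  unfold Spec_draw_christmas_tree
  obtain ⟨hb, hbc, hfc⟩ := hpre
  have hguard : ¬ (blocks < 1 ∨ border ∉ ([0, 1, 2] : List Int) ∨ fill ∉ ([0, 1, 2] : List Int)) := by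
    push Not
    exact ⟨by omega, hbc, hfc⟩
  rw [draw_christmas_tree, draw_christmas_tree_alt, if_neg hguard, if_neg hguard]
  simp only [pv_base_matrix]
  rw [PySem.List.pyRange_one]
  simp only [Int.sub_zero, List.foldl_map, List.map_map, zero_add]
  have hn : (((blocks * 3).toNat : Nat) : Int) ≤ blocks * 3 := by omega
  rw [pv_outer_inv blocks border fill hb _ hn]
  simp
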